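-- pv_equiv track=rewrite | github.com/pypi-data/pypi-mirror-396 | packages/sane-contractions/sane_contractions-0.3.2-py3-none-any.whl/contractions/transformer.py | build_apostrophe_variants
-- ===== SOURCE A (Python) =====
-- from itertools import product
--
-- def build_apostrophe_variants(contractions: dict[str, str], safety_keys: frozenset[str]) -> dict[str, str]:
--     apostrophe_variants = ["", "'"]
--     variants_dict = {}
--
--     for contraction, expansion in contractions.items():
--         if "'" not in contraction:
--             continue
--
--         if contraction.lower() in safety_keys:
--             continue
--
--         tokens = contraction.split("'")
--         combinations = _get_combinations(tokens, apostrophe_variants)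
--
--         for combination in combinations:
--             variants_dict[combination] = expansion
--
--     return variants_dict
--
-- def _get_combinations(tokens: list[str], joiners: list[str]) -> list[str]:
--     token_options = [[token] for token in tokens]
--     interspersed_options = _intersperse(token_options, joiners)
--     return ["".join(combination) for combination in product(*interspersed_options)]
--
-- def _intersperse(items: list, separator: list[str]) -> list:
--     num_items = len(items)
--     num_separators = num_items - 1
--     total_slots = num_items + num_separators
--
--     result = [separator] * total_slots
--     result[0::2] = items
--     return result
-- ===== SOURCE B (Python) =====
-- def build_apostrophe_variants(contractions: dict[str, str], safety_keys: frozenset[str]) -> dict[str, str]: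
--     variants_dict = {}
--     for contraction, expansion in contractions.items():
--         if "'" not in contraction:
--             continue
--         if contraction.lower() in safety_keys:
--             continue
--         for variant in _omission_variants(contraction):
--             variants_dict[variant] = expansion
--     return variants_dict
--
-- def _omission_variants(s: str) -> list[str]:
--     # Recurse over the characters of s; at each apostrophe branch into
--     # omitting it or keeping it. No tokenisation, no cartesian product.
--     if not s:
--         return [""]
--     tails = _omission_variants(s[1:])
--     if s[0] == "'":
--         return tails + ["'" + t for t in tails]
--     return [s[0] + t for t in tails]
-- ===== Notes on version B (the rewrite author's own statement) =====
-- stated objective: simpler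
-- what changed: Drops the split/_intersperse/itertools.product pipeline entirely: variants are generated by a direct recursion over the characters of the contraction that branches into omit/keep at each apostrophe.
import Mathlib
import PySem

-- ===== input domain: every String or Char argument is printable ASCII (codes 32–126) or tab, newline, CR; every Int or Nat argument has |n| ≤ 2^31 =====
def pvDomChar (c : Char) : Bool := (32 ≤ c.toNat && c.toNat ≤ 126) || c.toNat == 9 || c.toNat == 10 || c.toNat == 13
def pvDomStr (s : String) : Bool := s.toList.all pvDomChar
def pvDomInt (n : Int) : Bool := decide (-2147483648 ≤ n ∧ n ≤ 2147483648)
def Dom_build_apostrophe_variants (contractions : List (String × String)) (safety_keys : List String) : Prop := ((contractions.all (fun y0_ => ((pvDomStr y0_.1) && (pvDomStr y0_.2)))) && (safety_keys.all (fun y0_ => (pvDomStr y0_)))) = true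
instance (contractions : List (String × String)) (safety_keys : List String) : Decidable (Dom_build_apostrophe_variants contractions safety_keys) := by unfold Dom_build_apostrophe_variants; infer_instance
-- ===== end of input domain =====

-- B drops the split/_intersperse/itertools.product pipeline: it generates the variants by a
-- direct recursion over the contraction's characters, branching omit/keep at each apostrophe
-- (objective: simpler).

-- ===== PORT A =====
-- hand port of _intersperse's slice assignment (result = [separator]*(2n-1); result[0::2] = items):
-- exact — even slots carry the items in order, odd slots the separator.
def pvIntersperse (items : List (List String)) (separator : List String) : List (List String) :=
  match items with
  | [] => []
  | [x] => [x]
  | x :: xs => x :: separator :: pvIntersperse xs separator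

-- hand port of itertools.product(*lists): exact — tuples in lexicographic order of the factors,
-- the leftmost factor varying slowest.
def pvProduct (ls : List (List String)) : List (List String) :=
  ls.foldl (fun acc l => acc.flatMap (fun t => l.map (fun x => t ++ [x]))) [[]]

def pvGetCombinations (tokens : List String) (joiners : List String) : List String :=
  (pvProduct (pvIntersperse (tokens.map (fun t => [t])) joiners)).map
    (fun comb => PySem.Str.join "" comb)

-- port of A; contraction.split("'") has the nonempty literal separator "'", so split? is always
-- some and getD's default [] is unreachable.
def build_apostrophe_variants (contractions : List (String × String)) (safety_keys : List String) : List (String × String) :=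
  (((PySem.Dict.ofList contractions).items).foldl
    (fun (d : PySem.Dict String String) ce =>
      if PySem.Str.isIn "'" ce.1 = false then d
      else if safety_keys.contains (PySem.Str.lower ce.1) then d
      else
        (pvGetCombinations ((PySem.Str.split? ce.1 "'").getD []) ["", "'"]).foldl
          (fun d k => d.insert k ce.2) d)
    PySem.Dict.empty).items

-- ===== PORT B =====
-- port of Source B's _omission_variants: the recursion runs over the contraction as a List Char
-- (PySem's representation of str); the variant strings it builds are materialised with
-- String.ofList at the dict insertion below — exact.
def pvOmissionVariants : List Char → List (List Char)
  | [] => [[]]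
  | c :: cs =>
    let tails := pvOmissionVariants cs
    if c = '\'' then tails ++ tails.map (fun t => '\'' :: t)
    else tails.map (fun t => c :: t)

-- port of B (Source B)
def build_apostrophe_variants_alt (contractions : List (String × String)) (safety_keys : List String) : List (String × String) :=
  (((PySem.Dict.ofList contractions).items).foldl
    (fun (d : PySem.Dict String String) ce =>
      if PySem.Str.isIn "'" ce.1 = false then d
      else if safety_keys.contains (PySem.Str.lower ce.1) then d
      else
        (pvOmissionVariants ce.1.toList).foldl
          (fun d v => d.insert (String.ofList v) ce.2) d)
    PySem.Dict.empty).items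

-- ===== PRECONDITION & SPEC =====
def Spec_build_apostrophe_variants (contractions : List (String × String)) (safety_keys : List String) (out : List (String × String)) : Prop := out = build_apostrophe_variants_alt contractions safety_keys
instance (contractions : List (String × String)) (safety_keys : List String) (out : List (String × String)) : Decidable (Spec_build_apostrophe_variants contractions safety_keys out) := by unfold Spec_build_apostrophe_variants; infer_instance

-- ===== CLAIM (what is proved, stated in full; the proofs are below) =====
def Claim_equal_build_apostrophe_variants : Prop := ∀ (contractions : List (String × String)) (safety_keys : List String), Dom_build_apostrophe_variants contractions safety_keys → Spec_build_apostrophe_variants contractions safety_keys (build_apostrophe_variants contractions safety_keys)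

-- ===== LEMMAS AND PROOFS =====

-- simple structural splitter: split on the character q
def pvSplit (q : Char) : List Char → List (List Char)
  | [] => [[]]
  | c :: cs =>
    if c = q then [] :: pvSplit q cs
    else match pvSplit q cs with
         | [] => [[c]]   -- unreachable: pvSplit is never []
         | h :: t => (c :: h) :: t

theorem pvSplit_ne_nil (q : Char) (l : List Char) : pvSplit q l ≠ [] := by
  cases l with
  | nil => simp [pvSplit]
  | cons c cs =>
    rw [pvSplit]
    split
    · simp
    · split <;> simp

-- splitOn's fuel-based worker computes pvSplit, for a single-character separator
theorem pv_go_eq (q : Char) : ∀ (fuel : Nat) (l cur : List Char) (acc : List (List Char)),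
    l.length < fuel →
    PySem.Chars.splitOn.go [q] fuel l cur acc
      = acc.reverse ++ (match pvSplit q l with
                        | [] => []
                        | h :: t => (cur.reverse ++ h) :: t) := by
  intro fuel
  induction fuel with
  | zero => intro l cur acc h; omega
  | succ n ih =>
    intro l cur acc hlen
    cases l with
    | nil => simp [PySem.Chars.splitOn.go, pvSplit]
    | cons c rest =>
      rw [PySem.Chars.splitOn.go]
      by_cases hc : c = q
      · have hpre : List.isPrefixOf [q] (c :: rest) = true := by
          simp [List.isPrefixOf, hc]
        rw [if_pos hpre]
        have := ih rest [] (cur.reverse :: acc) (by simpa using Nat.lt_of_succ_lt_succ hlen)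
        rw [show List.drop (List.length [q]) (c :: rest) = rest from rfl, this]
        rcases hrest : pvSplit q rest with _ | ⟨h, t⟩
        · exact absurd hrest (pvSplit_ne_nil q rest)
        · simp [pvSplit, hc, hrest]
      · have hpre : List.isPrefixOf [q] (c :: rest) = false := by
          simp only [List.isPrefixOf, Bool.and_true, beq_eq_false_iff_ne, ne_eq]
          exact fun h => hc h.symm
        rw [if_neg (by simp [hpre])]
        have := ih rest (c :: cur) acc (Nat.lt_of_succ_lt_succ hlen)
        rw [this]
        rcases hrest : pvSplit q rest with _ | ⟨h, t⟩
        · exact absurd hrest (pvSplit_ne_nil q rest)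
        · simp [pvSplit, hc, hrest]

theorem pv_splitOn_eq (q : Char) (l : List Char) :
    PySem.Chars.splitOn l [q] = pvSplit q l := by
  rw [PySem.Chars.splitOn, pv_go_eq q (l.length + 1) l [] [] (Nat.lt_succ_self _)]
  rcases h : pvSplit q l with _ | ⟨a, t⟩
  · exact absurd h (pvSplit_ne_nil q l)
  · simp

-- common reference form: the combinations, on char lists, first-gap-varies-slowest
def pvCombosC : List (List Char) → List (List Char)
  | [] => [[]]
  | [t] => [t]
  | t :: ts => (pvCombosC ts).map (fun u => t ++ u) ++ (pvCombosC ts).map (fun u => t ++ '\'' :: u)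

-- prefix absorption for pvCombosC
theorem pvCombosC_absorb (a b : List Char) (rs : List (List Char)) :
    pvCombosC ((a ++ b) :: rs) = (pvCombosC (b :: rs)).map (fun u => a ++ u) := by
  cases rs with
  | nil => simp [pvCombosC]
  | cons x xs =>
    simp only [pvCombosC, List.map_append, List.map_map]
    congr 1 <;> (apply List.map_congr_left; intro u _; simp)

-- B side: the character recursion computes pvCombosC of the split
theorem pv_variants_eq (l : List Char) :
    pvOmissionVariants l = pvCombosC (pvSplit '\'' l) := by
  induction l with
  | nil => rfl
  | cons c cs ih =>
    rcases hcs : pvSplit '\'' cs with _ | ⟨h, t⟩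
    · exact absurd hcs (pvSplit_ne_nil _ cs)
    · by_cases hc : c = '\''
      · subst hc
        rw [pvOmissionVariants, if_pos rfl, ih, hcs,
          show pvSplit '\'' ('\'' :: cs) = [] :: pvSplit '\'' cs from by simp [pvSplit], hcs]
        simp only [pvCombosC, List.nil_append]
        cases t <;> simp [pvCombosC, Function.comp_def, List.append_assoc]
      · rw [pvOmissionVariants, if_neg hc, ih, hcs,
          show pvSplit '\'' (c :: cs) = (c :: h) :: t from by simp [pvSplit, hc, hcs]]
        have := pvCombosC_absorb [c] h t
        simpa using this.symm

-- === A side: previous machinery reducing the product pipeline to a doubling foldl ===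

theorem pv_join_nil_append_pair : ∀ (l : List (List Char)) (a b : List Char),
    PySem.Chars.join [] (l ++ [a, b]) = PySem.Chars.join [] l ++ a ++ b := by
  intro l
  induction l with
  | nil =>
    intro a b
    simp [PySem.Chars.join_nil, PySem.Chars.join_cons_cons, PySem.Chars.join_singleton]
  | cons x xs ih =>
    intro a b
    cases xs with
    | nil =>
      simp [PySem.Chars.join_singleton, PySem.Chars.join_cons_cons]
    | cons y ys =>
      have h := ih a b
      simp only [List.cons_append] at h ⊢
      rw [PySem.Chars.join_cons_cons, PySem.Chars.join_cons_cons, h]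
      simp [List.append_assoc]

theorem pv_join0_append_pair (u : List String) (a b : String) :
    PySem.Str.join "" (u ++ [a, b]) = PySem.Str.join "" u ++ a ++ b := by
  apply String.toList_inj.mp
  simp only [PySem.Str.toList_join, String.toList_append, List.map_append, List.map_cons,
    List.map_nil]
  have : ("" : String).toList = [] := rfl
  rw [this, pv_join_nil_append_pair]

theorem pv_join0_singleton (t : String) : PySem.Str.join "" [t] = t := by
  apply String.toList_inj.mp
  simp only [PySem.Str.toList_join, List.map_cons, List.map_nil]
  exact PySem.Chars.join_singleton _ _

-- one doubling step equals two product steps of A, under the join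
theorem pv_double_step (acc : List (List String)) (t : String) :
    ((acc.flatMap (fun u => (["", "'"] : List String).map (fun x => u ++ [x]))).flatMap
        (fun u => ([t] : List String).map (fun x => u ++ [x]))).map (fun u => PySem.Str.join "" u)
    = (acc.map (fun u => PySem.Str.join "" u)).flatMap
        (fun v => (["", "'"] : List String).map (fun sep => v ++ sep ++ t)) := by
  induction acc with
  | nil => rfl
  | cons u us ih =>
    simp only [List.flatMap_cons, List.map_cons, List.map_nil, List.map_append,
      List.flatMap_append] at ih ⊢
    rw [ih]
    simp [pv_join0_append_pair, List.append_assoc]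

-- the doubling foldl computes A's joined product, for any common prefix state
theorem pv_key : ∀ (rest : List String) (acc : List (List String)),
    ((rest.flatMap (fun t => [(["", "'"] : List String), [t]])).foldl
        (fun acc l => acc.flatMap (fun t => l.map (fun x => t ++ [x]))) acc).map
      (fun u => PySem.Str.join "" u)
    = rest.foldl
        (fun w tok => w.flatMap (fun v => (["", "'"] : List String).map (fun sep => v ++ sep ++ tok)))
        (acc.map (fun u => PySem.Str.join "" u)) := by
  intro rest
  induction rest with
  | nil => intro acc; rfl
  | cons t rs ih =>
    intro acc
    simp only [List.flatMap_cons, List.cons_append, List.nil_append, List.foldl_cons]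
    rw [ih, pv_double_step]

theorem pv_inter_cons : ∀ (xs : List (List String)) (x sep : List String),
    pvIntersperse (x :: xs) sep = x :: xs.flatMap (fun y => [sep, y]) := by
  intro xs
  induction xs with
  | nil => intro x sep; rfl
  | cons y ys ih =>
    intro x sep
    rw [show pvIntersperse (x :: y :: ys) sep = x :: sep :: pvIntersperse (y :: ys) sep from rfl,
      ih]
    simp

theorem pv_combos_eq (t : String) (rest : List String) :
    pvGetCombinations (t :: rest) ["", "'"]
    = rest.foldl
        (fun w tok => w.flatMap (fun v => (["", "'"] : List String).map (fun sep => v ++ sep ++ tok)))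
        [t] := by
  unfold pvGetCombinations pvProduct
  simp only [List.map_cons]
  rw [pv_inter_cons, List.flatMap_map]
  simp only [List.foldl_cons]
  have h0 : (([[]] : List (List String)).flatMap (fun u => ([t] : List String).map (fun x => u ++ [x]))) = [[t]] := rfl
  rw [h0, pv_key rest [[t]]]
  simp [pv_join0_singleton]

-- === connecting the doubling foldl to pvCombosC ===

-- the doubling step distributes over ++ of the working list
theorem pv_foldl_step_append : ∀ (rest : List String) (a b : List String),
    (rest.foldl
        (fun w tok => w.flatMap (fun v => (["", "'"] : List String).map (fun sep => v ++ sep ++ tok)))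
        (a ++ b))
    = rest.foldl
        (fun w tok => w.flatMap (fun v => (["", "'"] : List String).map (fun sep => v ++ sep ++ tok)))
        a
      ++ rest.foldl
        (fun w tok => w.flatMap (fun v => (["", "'"] : List String).map (fun sep => v ++ sep ++ tok)))
        b := by
  intro rest
  induction rest with
  | nil => intro a b; rfl
  | cons t rs ih =>
    intro a b
    simp only [List.foldl_cons, List.flatMap_append]
    exact ih _ _

theorem pv_foldl_eq_combosC : ∀ (hs : List (List Char)) (h : List Char),
    ((hs.map String.ofList).foldl
        (fun w tok => w.flatMap (fun v => (["", "'"] : List String).map (fun sep => v ++ sep ++ tok)))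
        [String.ofList h])
    = (pvCombosC (h :: hs)).map String.ofList := by
  intro hs
  induction hs with
  | nil => intro h; rfl
  | cons x xs ih =>
    intro h
    rw [List.map_cons, List.foldl_cons]
    have hstep : (([String.ofList h] : List String).flatMap
        (fun v => (["", "'"] : List String).map (fun sep => v ++ sep ++ String.ofList x)))
        = [String.ofList (h ++ x)] ++ [String.ofList (h ++ '\'' :: x)] := by
      have h2 : String.ofList h ++ "'" ++ String.ofList x = String.ofList (h ++ '\'' :: x) := by
        apply String.toList_inj.mp
        simp [show ("'" : String).toList = ['\''] from rfl]
      simp [h2]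
    rw [hstep, pv_foldl_step_append, ih (h ++ x), ih (h ++ '\'' :: x),
      pvCombosC_absorb h x xs,
      show h ++ '\'' :: x = (h ++ ['\'']) ++ x from by simp,
      pvCombosC_absorb (h ++ ['\'']) x xs]
    simp only [pvCombosC, List.map_append, List.map_map]
    congr 1
    apply List.map_congr_left; intro u _; simp

-- A's combinations for a contraction are exactly B's variants (as strings)
theorem pv_combos_eq_variants (s : String) :
    pvGetCombinations ((PySem.Str.split? s "'").getD []) ["", "'"]
    = (pvOmissionVariants s.toList).map String.ofList := by
  have hs : PySem.Str.split? s "'"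
      = some ((PySem.Chars.splitOn s.toList ("'".toList)).map String.ofList) := rfl
  rw [hs, Option.getD_some, show ("'" : String).toList = ['\''] from rfl,
    pv_splitOn_eq '\'' s.toList, pv_variants_eq]
  rcases h : pvSplit '\'' s.toList with _ | ⟨a, t⟩
  · exact absurd h (pvSplit_ne_nil _ _)
  · simp only [List.map_cons]
    rw [pv_combos_eq, pv_foldl_eq_combosC]

-- ===== VERDICT (by name: the statement is the Claim_ definition above) =====
theorem build_apostrophe_variants_spec : Claim_equal_build_apostrophe_variants := by
  intro contractions safety_keys _
  unfold Spec_build_apostrophe_variants build_apostrophe_variants build_apostrophe_variants_alt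
  congr 2
  funext d ce
  by_cases h1 : PySem.Str.isIn "'" ce.1 = false
  · rw [if_pos h1, if_pos h1]
  · rw [if_neg h1, if_neg h1]
    by_cases h2 : safety_keys.contains (PySem.Str.lower ce.1) = true
    · rw [if_pos h2, if_pos h2]
    · rw [if_neg h2, if_neg h2, pv_combos_eq_variants, List.foldl_map]
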